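-- pv_equiv track=rewrite | github.com/dami2106/RLSSOT | Skill_Learning/skill_helpers.py | segment_edges
-- ===== SOURCE A (Python) =====
-- def segment_edges(lst, mode):
--     if not lst:
--         return []
--
--     if mode not in {"start", "end"}:
--         raise ValueError("mode must be 'start' or 'end'")
--
--     edges = []
--     seg_start = lst[0]
--
--     for i in range(1, len(lst) + 1):
--         if i == len(lst) or lst[i] != lst[i - 1] + 1:
--             # segment ended at lst[i-1]
--             if mode == "start":
--                 edges.append(seg_start)
--             else:  # mode == "end"
--                 edges.append(lst[i - 1])
--             # prepare for next segment
--             if i < len(lst):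
--                 seg_start = lst[i]
--
--     return edges
-- ===== SOURCE B (Python) =====
-- def segment_edges(lst, mode):
--     if not lst:
--         return []
--
--     if mode not in {"start", "end"}:
--         raise ValueError("mode must be 'start' or 'end'")
--
--     pairs = list(zip(lst, lst[1:]))
--     if mode == "start":
--         return lst[:1] + [b for a, b in pairs if b != a + 1]
--     return [a for a, b in pairs if b != a + 1] + [lst[-1]]
-- ===== Notes on version B (the rewrite author's own statement) =====
-- stated objective: simpler
-- what changed: Replaces A's explicit index loop with seg_start state by pairing the list with its tail (zip) and filtering the adjacent pairs that break a +1-run: run starts are lst[:1] plus the second components of breaking pairs, run ends the first components plus lst[-1].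
-- outside the precondition, e.g. on segment_edges([1], 'x'): A raises ValueError, B raises ValueError
import Mathlib
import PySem

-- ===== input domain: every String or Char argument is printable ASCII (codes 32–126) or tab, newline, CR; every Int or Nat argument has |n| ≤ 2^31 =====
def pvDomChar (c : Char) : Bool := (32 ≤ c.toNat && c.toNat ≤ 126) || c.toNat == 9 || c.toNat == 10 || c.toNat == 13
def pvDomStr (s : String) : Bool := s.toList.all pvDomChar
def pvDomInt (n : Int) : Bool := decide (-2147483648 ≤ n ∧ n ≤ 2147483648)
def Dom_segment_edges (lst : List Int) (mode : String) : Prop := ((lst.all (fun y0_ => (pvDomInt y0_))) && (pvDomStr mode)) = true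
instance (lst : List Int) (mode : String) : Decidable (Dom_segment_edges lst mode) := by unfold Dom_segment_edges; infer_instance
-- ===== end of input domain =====

-- B replaces A's index loop with seg_start state by a zip of the list with its tail:
-- run breaks are exactly the adjacent pairs (a, b) with b ≠ a + 1 (objective: simpler; same cost).

-- ===== PORT A =====
-- A's loop body (the literal body of the 'for i in range(1, len(lst) + 1)' loop)
def pvStep (lst : List Int) (mode : String) (n : Int) (st : List Int × Int) (i : Int) : List Int × Int :=
  if i = n ∨ PySem.List.pyGetD lst i 0 ≠ PySem.List.pyGetD lst (i - 1) 0 + 1 then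
    let edges := st.1 ++ [if mode = "start" then st.2 else PySem.List.pyGetD lst (i - 1) 0]
    if i < n then (edges, PySem.List.pyGetD lst i 0) else (edges, st.2)
  else st

def segment_edges (lst : List Int) (mode : String) : List Int :=
  if lst = [] then []
  else if ¬(mode = "start" ∨ mode = "end") then []  -- Python raises ValueError here; excluded by Pre_
  else
    let n : Int := lst.length
    ((PySem.List.pyRange 1 (n + 1) 1).foldl (pvStep lst mode n)
      ([], PySem.List.pyGetD lst 0 0)).1

-- ===== PORT B =====
def segment_edges_alt (lst : List Int) (mode : String) : List Int :=
  if lst = [] then []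
  else if ¬(mode = "start" ∨ mode = "end") then []  -- Python raises ValueError here; excluded by Pre_
  else
    let pairs := lst.zip (PySem.List.slice lst (some 1) none)
    if mode = "start" then
      PySem.List.slice lst none (some 1)
        ++ (pairs.filter (fun p => decide (p.2 ≠ p.1 + 1))).map Prod.snd
    else
      (pairs.filter (fun p => decide (p.2 ≠ p.1 + 1))).map Prod.fst
        ++ [PySem.List.pyGetD lst (-1) 0]

-- ===== PRECONDITION & SPEC =====
-- Pre_ excludes only the inputs where A raises ValueError: a non-empty list with a mode other
-- than "start"/"end" (B raises the same ValueError there).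
def Pre_segment_edges (lst : List Int) (mode : String) : Prop :=
  lst = [] ∨ mode = "start" ∨ mode = "end"
instance (lst : List Int) (mode : String) : Decidable (Pre_segment_edges lst mode) := by
  unfold Pre_segment_edges; infer_instance
def pvWitness_segment_edges : List Int × String := ([1, 2, 3, 7, 8, 2], "start")

def Spec_segment_edges (lst : List Int) (mode : String) (out : List Int) : Prop := out = segment_edges_alt lst mode
instance (lst : List Int) (mode : String) (out : List Int) : Decidable (Spec_segment_edges lst mode out) := by unfold Spec_segment_edges; infer_instance

-- ===== CLAIM (what is proved, stated in full; the proofs are below) =====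
def Claim_equal_segment_edges : Prop := ∀ (lst : List Int) (mode : String), Dom_segment_edges lst mode → Pre_segment_edges lst mode → Spec_segment_edges lst mode (segment_edges lst mode)

-- ===== LEMMAS AND PROOFS =====

-- the trigger predicate of A's loop for indices 1 ≤ i < n
def pvTrig (lst : List Int) (i : Int) : Bool :=
  decide (PySem.List.pyGetD lst i 0 ≠ PySem.List.pyGetD lst (i - 1) 0 + 1)

theorem foldA_start (lst : List Int) (n : Int) :
    ∀ (d : Nat) (a : Int), (n - a).toNat = d → 1 ≤ a → a ≤ n →
    ∀ (acc : List Int) (seg : Int),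
      ((PySem.List.pyRange a (n + 1) 1).foldl (pvStep lst "start" n) (acc, seg)).1
        = acc ++ [seg] ++ ((PySem.List.pyRange a n 1).filter (pvTrig lst)).map
            (fun i => PySem.List.pyGetD lst i 0) := by
  intro d
  induction d with
  | zero =>
    intro a hd h1 h2 acc seg
    have ha : a = n := by omega
    subst ha
    rw [PySem.List.pyRange_one_cons (by omega), PySem.List.pyRange_one_eq_nil (by omega),
        PySem.List.pyRange_one_eq_nil (by omega)]
    simp [pvStep]
  | succ d ih =>
    intro a hd h1 h2 acc seg
    have ha : a < n := by omega
    rw [PySem.List.pyRange_one_cons (a := a) (b := n + 1) (by omega),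
        PySem.List.pyRange_one_cons (a := a) (b := n) (by omega)]
    simp only [List.foldl_cons, List.filter_cons]
    by_cases ht : pvTrig lst a = true
    · have hcond : PySem.List.pyGetD lst a 0 ≠ PySem.List.pyGetD lst (a - 1) 0 + 1 := by
        simpa [pvTrig] using ht
      have hstep : pvStep lst "start" n (acc, seg) a
          = (acc ++ [seg], PySem.List.pyGetD lst a 0) := by
        simp [pvStep, hcond, ha]
      rw [hstep, ih (a + 1) (by omega) (by omega) (by omega)]
      simp [ht]
    · have ht' : pvTrig lst a = false := by simpa using ht
      have hcond : ¬ PySem.List.pyGetD lst a 0 ≠ PySem.List.pyGetD lst (a - 1) 0 + 1 := by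
        simpa [pvTrig] using ht'
      have hstep : pvStep lst "start" n (acc, seg) a = (acc, seg) := by
        have hne : ¬ (a = n ∨ PySem.List.pyGetD lst a 0 ≠ PySem.List.pyGetD lst (a - 1) 0 + 1) :=
          fun h => h.elim (fun h1 => absurd h1 (by omega)) hcond
        simp [pvStep, hne]
      rw [hstep, ih (a + 1) (by omega) (by omega) (by omega)]
      simp [ht']

theorem foldA_end (lst : List Int) (n : Int) :
    ∀ (d : Nat) (a : Int), (n - a).toNat = d → 1 ≤ a → a ≤ n →
    ∀ (acc : List Int) (seg : Int),
      ((PySem.List.pyRange a (n + 1) 1).foldl (pvStep lst "end" n) (acc, seg)).1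
        = acc ++ ((PySem.List.pyRange a n 1).filter (pvTrig lst)).map
            (fun i => PySem.List.pyGetD lst (i - 1) 0) ++ [PySem.List.pyGetD lst (n - 1) 0] := by
  intro d
  induction d with
  | zero =>
    intro a hd h1 h2 acc seg
    have ha : a = n := by omega
    subst ha
    rw [PySem.List.pyRange_one_cons (by omega), PySem.List.pyRange_one_eq_nil (by omega),
        PySem.List.pyRange_one_eq_nil (by omega)]
    simp [pvStep]
  | succ d ih =>
    intro a hd h1 h2 acc seg
    have ha : a < n := by omega
    rw [PySem.List.pyRange_one_cons (a := a) (b := n + 1) (by omega),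
        PySem.List.pyRange_one_cons (a := a) (b := n) (by omega)]
    simp only [List.foldl_cons, List.filter_cons]
    by_cases ht : pvTrig lst a = true
    · have hcond : PySem.List.pyGetD lst a 0 ≠ PySem.List.pyGetD lst (a - 1) 0 + 1 := by
        simpa [pvTrig] using ht
      have hstep : pvStep lst "end" n (acc, seg) a
          = (acc ++ [PySem.List.pyGetD lst (a - 1) 0], PySem.List.pyGetD lst a 0) := by
        simp [pvStep, hcond, ha]
      rw [hstep, ih (a + 1) (by omega) (by omega) (by omega)]
      simp [ht]
    · have ht' : pvTrig lst a = false := by simpa using ht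
      have hcond : ¬ PySem.List.pyGetD lst a 0 ≠ PySem.List.pyGetD lst (a - 1) 0 + 1 := by
        simpa [pvTrig] using ht'
      have hstep : pvStep lst "end" n (acc, seg) a = (acc, seg) := by
        have hne : ¬ (a = n ∨ PySem.List.pyGetD lst a 0 ≠ PySem.List.pyGetD lst (a - 1) 0 + 1) :=
          fun h => h.elim (fun h1 => absurd h1 (by omega)) hcond
        simp [pvStep, hne]
      rw [hstep, ih (a + 1) (by omega) (by omega) (by omega)]
      simp [ht']

-- the zip of a list with its tail, written as a map over List.range
theorem zip_tail_eq_map_range (lst : List Int) :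
    lst.zip lst.tail
      = (List.range (lst.length - 1)).map
          (fun k => (lst.getD k 0, lst.getD (k + 1) 0)) := by
  apply List.ext_getElem
  · simp [List.length_zip, List.length_tail]
  · intro k h1 h2
    have hk : k < lst.length - 1 := by
      simp [List.length_zip, List.length_tail] at h1; omega
    have e1 : lst[k]? = some (lst[k]'(by omega)) := List.getElem?_eq_getElem (by omega)
    have e2 : lst[k + 1]? = some (lst[k + 1]'(by omega)) := List.getElem?_eq_getElem (by omega)
    simp [List.getElem_zip, List.getElem_tail, List.getD_eq_getElem?_getD, e1, e2]

theorem pyGetD_one_add (lst : List Int) (k : Nat) :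
    PySem.List.pyGetD lst (1 + (k : Int)) 0 = lst.getD (k + 1) 0 := by
  have h : (1 : Int) + (k : Int) = ((k + 1 : Nat) : Int) := by omega
  rw [h, PySem.List.pyGetD_natCast]

theorem pyGetD_one_add_sub (lst : List Int) (k : Nat) :
    PySem.List.pyGetD lst (1 + (k : Int) - 1) 0 = lst.getD k 0 := by
  have h : (1 : Int) + (k : Int) - 1 = ((k : Nat) : Int) := by omega
  rw [h, PySem.List.pyGetD_natCast]

-- A's filtered index range [1..n-1] matched with B's filtered pairs, value at the break
theorem range_filter_snd (lst : List Int) :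
    ((PySem.List.pyRange 1 (lst.length : Int) 1).filter (pvTrig lst)).map
        (fun i => PySem.List.pyGetD lst i 0)
      = ((lst.zip lst.tail).filter (fun p => decide (p.2 ≠ p.1 + 1))).map Prod.snd := by
  rw [zip_tail_eq_map_range, PySem.List.pyRange_one, List.filter_map, List.filter_map]
  have hlen : ((lst.length : Int) - 1).toNat = lst.length - 1 := by omega
  rw [hlen]
  have hfil : ∀ k ∈ List.range (lst.length - 1),
      (pvTrig lst ∘ fun k : Nat => 1 + (k : Int)) k
        = ((fun p : Int × Int => decide (p.2 ≠ p.1 + 1))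
            ∘ fun k : Nat => (lst.getD k 0, lst.getD (k + 1) 0)) k := by
    intro k _
    simp only [Function.comp, pvTrig, pyGetD_one_add, pyGetD_one_add_sub]
  rw [List.filter_congr hfil, List.map_map, List.map_map]
  refine List.map_congr_left fun k _ => ?_
  simp only [Function.comp, pyGetD_one_add]

-- same, but the value before the break
theorem range_filter_fst (lst : List Int) :
    ((PySem.List.pyRange 1 (lst.length : Int) 1).filter (pvTrig lst)).map
        (fun i => PySem.List.pyGetD lst (i - 1) 0)
      = ((lst.zip lst.tail).filter (fun p => decide (p.2 ≠ p.1 + 1))).map Prod.fst := by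
  rw [zip_tail_eq_map_range, PySem.List.pyRange_one, List.filter_map, List.filter_map]
  have hlen : ((lst.length : Int) - 1).toNat = lst.length - 1 := by omega
  rw [hlen]
  have hfil : ∀ k ∈ List.range (lst.length - 1),
      (pvTrig lst ∘ fun k : Nat => 1 + (k : Int)) k
        = ((fun p : Int × Int => decide (p.2 ≠ p.1 + 1))
            ∘ fun k : Nat => (lst.getD k 0, lst.getD (k + 1) 0)) k := by
    intro k _
    simp only [Function.comp, pvTrig, pyGetD_one_add, pyGetD_one_add_sub]
  rw [List.filter_congr hfil, List.map_map, List.map_map]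
  refine List.map_congr_left fun k _ => ?_
  simp only [Function.comp, pyGetD_one_add_sub]

-- ===== VERDICT (by name: the statement is the Claim_ definition above) =====
theorem segment_edges_spec : Claim_equal_segment_edges := by
  intro lst mode _hdom hpre
  unfold Spec_segment_edges segment_edges segment_edges_alt
  by_cases hnil : lst = []
  · simp [hnil]
  · have hmode : mode = "start" ∨ mode = "end" := hpre.resolve_left hnil
    have hpos : 0 < lst.length := List.length_pos_iff.mpr hnil
    have hlen : 1 ≤ (lst.length : Int) := by omega
    simp only [hnil, if_false, if_neg (not_not_intro hmode)]
    rw [PySem.List.slice_from_one]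
    rcases hmode with hm | hm <;> subst hm
    · simp only [reduceIte]
      rw [foldA_start lst (lst.length : Int) ((lst.length : Int) - 1).toNat 1 rfl (by omega) hlen]
      rw [PySem.List.slice_to lst (by norm_num), range_filter_snd lst]
      have htake : lst.take (1 : Int).toNat = [lst.getD 0 0] := by
        cases lst with
        | nil => exact absurd rfl hnil
        | cons x xs => simp
      rw [htake]
      simp [PySem.List.pyGetD_zero]
    · simp only [String.reduceEq, reduceIte]
      rw [foldA_end lst (lst.length : Int) ((lst.length : Int) - 1).toNat 1 rfl (by omega) hlen]
      rw [range_filter_fst lst]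
      have hlast : PySem.List.pyGetD lst ((lst.length : Int) - 1) 0
          = PySem.List.pyGetD lst (-1) 0 := by
        rw [PySem.List.pyGetD_neg_one lst 0 hnil]
        have h : ((lst.length : Int) - 1) = ((lst.length - 1 : Nat) : Int) := by omega
        rw [h, PySem.List.pyGetD_natCast, List.getLast_eq_getElem,
          List.getD_eq_getElem?_getD, List.getElem?_eq_getElem (by omega)]
        rfl
      rw [hlast]
      simp
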